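-- pv_equiv track=rewrite | github.com/Sierra-034/advent-of-code-2024 | src/day_5_1.py | get_ordering_map_from
-- ===== SOURCE A (Python) =====
-- def get_ordering_map_from(page_ordering_rules: list[tuple[int, int]]) -> dict[int, list]:
--     ordering_map = dict()
--     for x, y in page_ordering_rules:
--         if x not in ordering_map:
--             ordering_map[x] = [y]
--         else:
--             ordering_map[x].append(y)
--
--     return ordering_map
-- ===== SOURCE B (Python) =====
-- def get_ordering_map_from(page_ordering_rules: list[tuple[int, int]]) -> dict[int, list]:
--     keys = dict.fromkeys(x for x, _ in page_ordering_rules)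
--     return {x: [y for a, y in page_ordering_rules if a == x] for x in keys}
-- ===== Notes on version B (the rewrite author's own statement) =====
-- stated objective: alternative
-- what changed: Replaces the single accumulating dict-building pass with a two-phase dict comprehension: first collect distinct source keys in first-appearance order via dict.fromkeys, then rescan the whole rule list once per key to gather its targets.
import Mathlib
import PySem

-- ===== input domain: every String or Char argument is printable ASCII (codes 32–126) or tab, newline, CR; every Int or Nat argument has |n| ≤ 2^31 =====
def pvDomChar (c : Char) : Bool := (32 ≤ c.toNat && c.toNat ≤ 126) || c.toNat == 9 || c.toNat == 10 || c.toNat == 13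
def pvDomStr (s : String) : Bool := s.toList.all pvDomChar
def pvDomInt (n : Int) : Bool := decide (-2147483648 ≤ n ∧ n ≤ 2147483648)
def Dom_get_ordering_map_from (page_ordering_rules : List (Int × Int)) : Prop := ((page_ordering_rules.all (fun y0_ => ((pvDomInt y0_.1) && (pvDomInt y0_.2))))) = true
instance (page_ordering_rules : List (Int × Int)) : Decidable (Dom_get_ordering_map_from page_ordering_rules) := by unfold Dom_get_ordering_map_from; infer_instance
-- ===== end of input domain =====

-- B replaces A's single accumulating dict-building pass by a two-phase dict comprehension
-- (distinct keys first, then one filtering scan of the rule list per key); objective: alternative.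

-- ===== PORT A =====
-- one loop over the rules, growing a dict: new key ↦ [y], known key ↦ append y
def get_ordering_map_from (page_ordering_rules : List (Int × Int)) : List (Int × List Int) :=
  (page_ordering_rules.foldl
    (fun d p =>
      if d.contains p.1 = false then d.insert p.1 [p.2]
      else d.modify p.1 [] (fun l => l ++ [p.2]))
    (PySem.Dict.empty : PySem.Dict Int (List Int))).items

-- ===== PORT B =====
-- dict.fromkeys over the sources, then a dict comprehension filtering the whole list per key
def get_ordering_map_from_alt (page_ordering_rules : List (Int × Int)) : List (Int × List Int) :=
  (PySem.List.dedup (page_ordering_rules.map Prod.fst)).map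
    (fun x => (x, (page_ordering_rules.filter (fun p => p.1 == x)).map Prod.snd))

-- ===== PRECONDITION & SPEC =====
def Spec_get_ordering_map_from (page_ordering_rules : List (Int × Int)) (out : List (Int × List Int)) : Prop := out = get_ordering_map_from_alt page_ordering_rules
instance (page_ordering_rules : List (Int × Int)) (out : List (Int × List Int)) : Decidable (Spec_get_ordering_map_from page_ordering_rules out) := by unfold Spec_get_ordering_map_from; infer_instance

-- ===== CLAIM (what is proved, stated in full; the proofs are below) =====
def Claim_equal_get_ordering_map_from : Prop := ∀ (page_ordering_rules : List (Int × Int)), Dom_get_ordering_map_from page_ordering_rules → Spec_get_ordering_map_from page_ordering_rules (get_ordering_map_from page_ordering_rules)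

-- ===== LEMMAS AND PROOFS =====

-- A's branching step is exactly Dict.modify with default []
theorem pv_step_eq_modify (d : PySem.Dict Int (List Int)) (p : Int × Int) :
    (if d.contains p.1 = false then d.insert p.1 [p.2]
     else d.modify p.1 [] (fun l => l ++ [p.2]))
    = d.modify p.1 [] (fun l => l ++ [p.2]) := by
  by_cases h : d.contains p.1 = false
  · simp only [h, if_true]
    simp [PySem.Dict.modify, PySem.Dict.getD_of_not_contains (h := h)]
  · simp [h]

theorem pv_spec_aux (rules : List (Int × Int)) :
    get_ordering_map_from rules = get_ordering_map_from_alt rules := by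
  unfold get_ordering_map_from get_ordering_map_from_alt
  have hstep : rules.foldl
      (fun d p =>
        if d.contains p.1 = false then d.insert p.1 [p.2]
        else d.modify p.1 [] (fun l => l ++ [p.2]))
      (PySem.Dict.empty : PySem.Dict Int (List Int))
      = rules.foldl (fun d p => d.modify p.1 [] (fun l => l ++ [p.2]))
        (PySem.Dict.empty : PySem.Dict Int (List Int)) := by
    exact PySem.List.foldl_congr_mem rules _ _ _ (fun acc x _ => pv_step_eq_modify acc x)
  rw [hstep]
  set D := rules.foldl (fun d p => d.modify p.1 [] (fun l => l ++ [p.2]))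
    (PySem.Dict.empty : PySem.Dict Int (List Int)) with hD
  have hkeys : D.keys = PySem.List.dedup (rules.map Prod.fst) := by
    rw [hD, PySem.Dict.keys_foldl_modify_key]
    simp [PySem.Set.update, PySem.Set.ofList_eq_foldl, PySem.List.dedup_eq_ofList]
  have hnd : D.keys.Nodup := by
    rw [hkeys]; exact PySem.List.nodup_dedup _
  have hget : ∀ c, D.getD c [] = (rules.filter (fun p => p.1 == c)).map Prod.snd := by
    intro c
    rw [hD, PySem.Dict.getD_foldl_modify_append]
    simp [PySem.Dict.getD_empty]
  rw [PySem.Dict.items_eq_map_keys D hnd []]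
  rw [hkeys]
  refine List.map_congr_left ?_
  intro x _
  rw [hget x]

-- ===== VERDICT (by name: the statement is the Claim_ definition above) =====
theorem get_ordering_map_from_spec : Claim_equal_get_ordering_map_from := by
  intro rules _
  exact pv_spec_aux rules
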